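-- pv_equiv track=rewrite | github.com/kyuridenamida/atcoder-tools | atcodertools/fmtprediction/tokenize_format.py | _remove_spaces_in_curly_brackets
-- ===== SOURCE A (Python) =====
-- def _remove_spaces_in_curly_brackets(input_format):
--     res = []
--     nest = 0
--     for c in input_format:
--         if c == '{':
--             nest += 1
--         elif c == '}':
--             nest -= 1
--
--         if c == ' ' and nest > 0:
--             continue
--
--         res.append(c)
--
--     return "".join(res)
-- ===== SOURCE B (Python) =====
-- def _remove_spaces_in_curly_brackets(input_format):
--     # A space at index i lies inside curly brackets iff the prefix before it
--     # contains strictly more '{' than '}'.  Check that condition per space with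
--     # str.count on the prefix -- no running nesting counter is maintained.
--     return ''.join(
--         c for i, c in enumerate(input_format)
--         if c != ' '
--         or input_format.count('{', 0, i) <= input_format.count('}', 0, i)
--     )
-- ===== Notes on version B (the rewrite author's own statement) =====
-- stated objective: alternative
-- what changed: B drops the running nesting counter entirely: it decides each space independently by a declarative condition (strictly more '{' than '}' in the prefix before it, via str.count), a brute-force prefix-count filter instead of A's single-pass state machine.
import Mathlib
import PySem

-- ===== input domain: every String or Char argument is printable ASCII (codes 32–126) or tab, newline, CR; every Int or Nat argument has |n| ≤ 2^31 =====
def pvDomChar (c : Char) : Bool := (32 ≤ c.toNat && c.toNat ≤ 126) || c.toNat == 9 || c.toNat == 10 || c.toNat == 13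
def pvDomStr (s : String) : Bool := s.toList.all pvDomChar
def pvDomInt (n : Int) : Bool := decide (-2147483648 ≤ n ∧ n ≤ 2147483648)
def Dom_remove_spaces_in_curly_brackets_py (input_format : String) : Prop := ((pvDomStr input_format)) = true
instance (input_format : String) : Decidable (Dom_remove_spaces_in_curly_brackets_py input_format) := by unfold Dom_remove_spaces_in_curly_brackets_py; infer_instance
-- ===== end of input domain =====

-- B replaces A's single-pass nesting-counter state machine by a stateless filter: each space is
-- judged independently by counting '{' and '}' in the prefix before it (same result, no speedup).

-- ===== PORT A =====
-- one loop: update nest, skip spaces when nest > 0, append otherwise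
def remove_spaces_in_curly_brackets_py (input_format : String) : String :=
  (input_format.toList.foldl
    (fun (st : Int × List Char) c =>
      let nest : Int :=
        if c = '{' then st.1 + 1 else if c = '}' then st.1 - 1 else st.1
      if c = ' ' ∧ nest > 0 then (nest, st.2) else (nest, st.2 ++ [c]))
    (0, [])).2.asString

-- ===== PORT B =====
-- keep c unless it is a space whose prefix has strictly more '{' than '}' (str.count on s[:i])
def remove_spaces_in_curly_brackets_py_alt (input_format : String) : String :=
  (((PySem.List.enumerate input_format.toList).filter
      (fun p => p.2 ≠ ' ' ∨
        (input_format.toList.take p.1.toNat).count '{'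
          ≤ (input_format.toList.take p.1.toNat).count '}')).map
    Prod.snd).asString

-- ===== PRECONDITION & SPEC =====
def Spec_remove_spaces_in_curly_brackets_py (input_format : String) (out : String) : Prop := out = remove_spaces_in_curly_brackets_py_alt input_format
instance (input_format : String) (out : String) : Decidable (Spec_remove_spaces_in_curly_brackets_py input_format out) := by unfold Spec_remove_spaces_in_curly_brackets_py; infer_instance

-- ===== CLAIM (what is proved, stated in full; the proofs are below) =====
def Claim_equal_remove_spaces_in_curly_brackets_py : Prop := ∀ (input_format : String), Dom_remove_spaces_in_curly_brackets_py input_format → Spec_remove_spaces_in_curly_brackets_py input_format (remove_spaces_in_curly_brackets_py input_format)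

-- ===== LEMMAS AND PROOFS =====

-- enumerate with start s+1 is the start-s enumeration with every index shifted by one
theorem pv_enumerate_shift {α : Type} (xs : List α) (s : Int) :
    PySem.List.enumerate xs (s + 1)
      = (PySem.List.enumerate xs s).map (fun p => (p.1 + 1, p.2)) := by
  induction xs generalizing s with
  | nil => simp [PySem.List.enumerate_nil]
  | cons x rest ih =>
    simp only [PySem.List.enumerate_cons, List.map_cons]
    rw [ih]

-- A's loop started at nest = n, acc res, equals res ++ B's prefix-count filter offset by n.
theorem pv_loop_eq (cs : List Char) (n : Int) (res : List Char) :
    (cs.foldl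
      (fun (st : Int × List Char) c =>
        let nest : Int :=
          if c = '{' then st.1 + 1 else if c = '}' then st.1 - 1 else st.1
        if c = ' ' ∧ nest > 0 then (nest, st.2) else (nest, st.2 ++ [c]))
      (n, res)).2
    = res ++ ((PySem.List.enumerate cs).filter
        (fun p => p.2 ≠ ' ' ∨
          n + ((cs.take p.1.toNat).count '{' : Int)
            - ((cs.take p.1.toNat).count '}' : Int) ≤ 0)).map Prod.snd := by
  induction cs generalizing n res with
  | nil => simp [PySem.List.enumerate_nil]
  | cons c rest ih =>
    have hshift := pv_enumerate_shift rest 0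
    set n' : Int := if c = '{' then n + 1 else if c = '}' then n - 1 else n with hn'
    have hcong :
        ((PySem.List.enumerate rest 0).map (fun p => (p.1 + 1, p.2))).filter
          (fun p => decide (p.2 ≠ ' ' ∨
            n + (((c :: rest).take p.1.toNat).count '{' : Int)
              - (((c :: rest).take p.1.toNat).count '}' : Int) ≤ 0))
        = ((PySem.List.enumerate rest 0).filter
            (fun p => decide (p.2 ≠ ' ' ∨
              n' + ((rest.take p.1.toNat).count '{' : Int)
                - ((rest.take p.1.toNat).count '}' : Int) ≤ 0))).map
            (fun p => (p.1 + 1, p.2)) := by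
      rw [List.filter_map]
      congr 1
      apply List.filter_congr
      intro p hp
      rcases (PySem.List.mem_enumerate_iff _ _ p).1 hp with ⟨k, hk, rfl⟩
      simp only [Function.comp]
      have h1 : ((0 : Int) + k + 1).toNat = k + 1 := by omega
      have h0 : ((0 : Int) + k).toNat = k := by omega
      have harith : n + (((c :: rest).take (k + 1)).count '{' : Int)
            - (((c :: rest).take (k + 1)).count '}' : Int)
          = n' + ((rest.take k).count '{' : Int) - ((rest.take k).count '}' : Int) := by
        simp only [List.take_succ_cons, List.count_cons, hn']
        rcases eq_or_ne c '{' with h3 | h3 <;> rcases eq_or_ne c '}' with h4 | h4 <;>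
          simp_all <;> push_cast <;> ring_nf
      simp only [h1, h0]
      rw [decide_eq_decide, harith]
    simp only [List.foldl_cons, PySem.List.enumerate_cons, List.filter_cons]
    by_cases hc : c = ' '
    · subst hc
      have h1 : (' ' : Char) ≠ '{' := by decide
      have h2 : (' ' : Char) ≠ '}' := by decide
      have hn'' : n' = n := by simp [hn']
      by_cases hn : (0 : Int) < n
      · rw [if_pos (by simp [hn])]
        have hp : (decide ((' ' : Char) ≠ ' ' ∨
            n + (((' ' :: rest).take ((0:Int).toNat)).count '{' : Int)
              - (((' ' :: rest).take ((0:Int).toNat)).count '}' : Int) ≤ 0)) = false := by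
          simp; omega
        rw [hp, ih, hshift, hcong, hn'']
        simp
      · rw [if_neg (by simp; omega)]
        have hp : (decide ((' ' : Char) ≠ ' ' ∨
            n + (((' ' :: rest).take ((0:Int).toNat)).count '{' : Int)
              - (((' ' :: rest).take ((0:Int).toNat)).count '}' : Int) ≤ 0)) = true := by
          simp; omega
        rw [hp, ih, hshift, hcong, hn'']
        simp
    · rw [if_neg (fun h => hc h.1)]
      have hp : (decide (c ≠ ' ' ∨
          n + (((c :: rest).take ((0:Int).toNat)).count '{' : Int)
            - (((c :: rest).take ((0:Int).toNat)).count '}' : Int) ≤ 0)) = true := by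
        simp [hc]
      rw [hp, ih, hshift, hcong, ← hn']
      simp

-- ===== VERDICT (by name: the statement is the Claim_ definition above) =====
theorem remove_spaces_in_curly_brackets_py_spec : Claim_equal_remove_spaces_in_curly_brackets_py := by
  intro s _
  unfold Spec_remove_spaces_in_curly_brackets_py
  unfold remove_spaces_in_curly_brackets_py remove_spaces_in_curly_brackets_py_alt
  rw [pv_loop_eq]
  simp only [List.nil_append]
  congr 1
  congr 1
  apply List.filter_congr
  intro p hp
  simp only [decide_eq_decide]
  constructor <;> rintro (h | h) <;> [exact Or.inl h; skip; exact Or.inl h; skip] <;>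
    exact Or.inr (by omega)
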